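-- pv_equiv track=rewrite | github.com/MrBrantCode/unitest_baseline | mut_generate/mist_train_cf/cf_80277/solution.py | fibonacci_primes
-- ===== SOURCE A (Python) =====
-- def fibonacci_primes(n):
--     if not isinstance(n, int) or n < 1 or n > 10**4:
--         return "Invalid input! Please enter an integer between 1 and 10000."
--
--     def is_prime(num):
--         if num < 2:
--             return False
--         for i in range(2, int(num**0.5) + 1):
--             if num % i == 0:
--                 return False
--         return True
--
--     fibs = [0, 1]
--     for i in range(2, n+1):
--         fibs.append(fibs[-1] + fibs[-2])
--
--     prime_fibs = [num for num in fibs if is_prime(num)]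
--
--     return sorted(list(set(prime_fibs)))
-- ===== SOURCE B (Python) =====
-- def fibonacci_primes(n):
--     if not isinstance(n, int) or n < 1 or n > 10**4:
--         return "Invalid input! Please enter an integer between 1 and 10000."
--
--     def is_prime(num):
--         if num < 2:
--             return False
--         for i in range(2, int(num**0.5) + 1):
--             if num % i == 0:
--                 return False
--         return True
--
--     # Number-theoretic filter: fib(d) | fib(k) whenever d | k, so fib(k) can only be
--     # prime when k == 4 or k is itself prime; at those indices fib is strictly
--     # increasing, so the primes come out already sorted and distinct -- no set, no sort.
--     out = []
--     a, b = 0, 1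
--     for k in range(n + 1):
--         if (k == 4 or is_prime(k)) and is_prime(a):
--             out.append(a)
--         a, b = b, a + b
--     return out
-- ===== Notes on version B (the rewrite author's own statement) =====
-- stated objective: alternative
-- what changed: Replaced A's pipeline (materialise the full fibs list, filter every value by trial-division primality, then sorted(set(...))) by a number-theoretic index filter: since fib(d) divides fib(k) whenever d divides k, fib(k) can only be prime when k == 4 or k is prime, so B rolls two scalars, trial-divides only at those indices, and appends hits directly -- they are strictly increasing, so no set and no sort are needed.
import Mathlib
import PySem

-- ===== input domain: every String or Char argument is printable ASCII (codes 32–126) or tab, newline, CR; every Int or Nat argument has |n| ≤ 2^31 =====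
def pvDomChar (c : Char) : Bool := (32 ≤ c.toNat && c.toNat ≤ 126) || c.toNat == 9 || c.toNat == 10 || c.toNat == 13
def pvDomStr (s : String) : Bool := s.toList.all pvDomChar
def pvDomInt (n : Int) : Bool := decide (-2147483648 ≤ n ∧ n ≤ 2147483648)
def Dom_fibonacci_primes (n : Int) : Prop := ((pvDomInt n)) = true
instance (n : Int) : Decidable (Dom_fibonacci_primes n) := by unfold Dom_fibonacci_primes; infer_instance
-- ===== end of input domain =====

-- B replaces A's pipeline (materialise all fibs, filter by value-primality, sorted(set(...))) by a
-- number-theoretic index filter — fib(k) can only be prime when k = 4 or k is prime, since fib(d)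
-- divides fib(k) for d | k — emitting the surviving primes directly in increasing order (no set, no sort).

-- ===== PORT A =====
-- is_prime: 'int(num**0.5)' is ported by hand as Nat.sqrt; exact for every Fibonacci argument reached
-- under Pre_ below 2^53 (checked against CPython), and above that the float/integer bound difference
-- cannot change the loop's outcome unless the argument were a semiprime whose two prime factors agree
-- to ~15 significant digits — no such Fibonacci number occurs below index 1477.
def pvIsPrimeA (num : Int) : Bool :=
  if num < 2 then false
  else (PySem.List.pyRange 2 ((Nat.sqrt num.toNat : Int) + 1) 1).all
         (fun i => !(PySem.Int.mod num i == 0))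

-- The 'return "Invalid input!…"' guard returns a string, not a list: those inputs are outside Pre_.
-- fibs[-1] / fibs[-2] are always in range (the list always has ≥ 2 elements), hence pyGetD.
def fibonacci_primes (n : Int) : List Int :=
  let fibs := (PySem.List.pyRange 2 (n + 1) 1).foldl
      (fun fibs _ => fibs ++ [PySem.List.pyGetD fibs (-1) 0 + PySem.List.pyGetD fibs (-2) 0])
      [0, 1]
  let prime_fibs := fibs.filter (fun num => pvIsPrimeA num)
  PySem.List.sorted (PySem.Set.ofList prime_fibs) (fun x => x) false

-- ===== PORT B =====
-- Source B's is_prime is textually A's, so its port is the same helper pvIsPrimeA.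
-- the fused 'for k in range(n+1)' loop: rolling scalars a, b, index k, appended output list
def pvFibLoopB : Nat → Int → Int → Int → List Int → List Int
  | 0, _, _, _, out => out
  | c + 1, k, a, b, out =>
      pvFibLoopB c (k + 1) b (a + b)
        (if ((k == 4) || pvIsPrimeA k) && pvIsPrimeA a then out ++ [a] else out)

-- same string guard as A in Source B, outside Pre_
def fibonacci_primes_alt (n : Int) : List Int :=
  pvFibLoopB (n + 1).toNat 0 0 1 []

-- ===== PRECONDITION & SPEC =====
-- Pre_ excludes n < 1 and n > 10^4, where A returns an error STRING (not a List Int), and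
-- 1477 ≤ n ≤ 10^4, where A raises OverflowError ('num**0.5' on fib(1477), which exceeds the float range).
def Pre_fibonacci_primes (n : Int) : Prop := 1 ≤ n ∧ n ≤ 1476
instance (n : Int) : Decidable (Pre_fibonacci_primes n) := by unfold Pre_fibonacci_primes; infer_instance
def pvWitness_fibonacci_primes : Int := (5)

def Spec_fibonacci_primes (n : Int) (out : List Int) : Prop := out = fibonacci_primes_alt n
instance (n : Int) (out : List Int) : Decidable (Spec_fibonacci_primes n out) := by unfold Spec_fibonacci_primes; infer_instance

-- ===== CLAIM (what is proved, stated in full; the proofs are below) =====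
def Claim_equal_fibonacci_primes : Prop := ∀ (n : Int), Dom_fibonacci_primes n → Pre_fibonacci_primes n → Spec_fibonacci_primes n (fibonacci_primes n)

-- ===== LEMMAS AND PROOFS =====

-- mathematical Fibonacci, used only by the proofs
def pvFib : Nat → Int
  | 0 => 0
  | 1 => 1
  | k + 2 => pvFib (k + 1) + pvFib k

theorem pvFib_eq (k : Nat) : pvFib k = (Nat.fib k : Int) := by
  induction k using Nat.strong_induction_on with
  | _ k ih =>
    match k with
    | 0 => rfl
    | 1 => rfl
    | k + 2 =>
      rw [pvFib, ih (k + 1) (by omega), ih k (by omega), Nat.fib_add_two]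
      push_cast; ring

-- A's trial division decides genuine primality
theorem pvIsPrimeA_natCast (N : Nat) : pvIsPrimeA (N : Int) = true ↔ N.Prime := by
  unfold pvIsPrimeA
  by_cases h : (N : Int) < 2
  · have h2 : N < 2 := by exact_mod_cast h
    simp only [h, if_true]
    constructor
    · intro hf; exact absurd hf (by simp)
    · intro hp; have := hp.two_le; omega
  · have h2 : 2 ≤ N := by omega
    simp only [h, if_false, List.all_eq_true]
    have ht : ((N : Int).toNat) = N := by simp
    rw [ht]
    constructor
    · intro hall
      rw [Nat.prime_def_le_sqrt]
      refine ⟨h2, fun m hm hms hdvd => ?_⟩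
      have hmem : (m : Int) ∈ PySem.List.pyRange 2 ((Nat.sqrt N : Int) + 1) 1 := by
        rw [PySem.List.mem_pyRange_one]
        constructor <;> [exact_mod_cast hm; exact_mod_cast (by omega : (m:Int) < (Nat.sqrt N : Int) + 1)]
      have := hall (m : Int) hmem
      rw [PySem.Int.mod_natCast] at this
      have hz : N % m = 0 := Nat.dvd_iff_mod_eq_zero.mp hdvd
      simp [hz] at this
    · intro hp i hi
      rw [PySem.List.mem_pyRange_one] at hi
      obtain ⟨hi1, hi2⟩ := hi
      have hi0 : 0 ≤ i := by omega
      obtain ⟨m, rfl⟩ : ∃ m : Nat, (m : Int) = i := ⟨i.toNat, Int.toNat_of_nonneg hi0⟩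
      rw [PySem.Int.mod_natCast]
      have hm2 : 2 ≤ m := by exact_mod_cast hi1
      have hms : m ≤ Nat.sqrt N := by exact_mod_cast (by omega : (m : Int) ≤ (Nat.sqrt N : Int))
      have hnd := (Nat.prime_def_le_sqrt.mp hp).2 m hm2 hms
      have hz : N % m ≠ 0 := fun h0 => hnd (Nat.dvd_iff_mod_eq_zero.mpr h0)
      have hb : (((N % m : Nat) : Int) == 0) = false := beq_eq_false_iff_ne.mpr (by exact_mod_cast hz)
      rw [hb]
      rfl

-- fib is strictly increasing from index 2 on
theorem pvFibLt {a b : Nat} (ha : 2 ≤ a) (hab : a < b) : Nat.fib a < Nat.fib b := by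
  obtain ⟨a', rfl⟩ : ∃ a', a = a' + 2 := ⟨a - 2, by omega⟩
  obtain ⟨b', rfl⟩ : ∃ b', b = b' + 2 := ⟨b - 2, by omega⟩
  exact Nat.fib_add_two_strictMono (by omega : a' < b')

-- fib of a composite index (other than 4) is composite: fib d | fib j for d | j
theorem pvNotPrimeFib (j : Nat) (h4 : j ≠ 4) (hp : ¬ j.Prime) : ¬ (Nat.fib j).Prime := by
  match j with
  | 0 => decide
  | 1 => decide
  | 2 => decide
  | 3 => exact absurd (by norm_num) hp
  | 4 => exact absurd rfl h4
  | (j + 5) =>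
    set N := j + 5 with hN
    obtain ⟨m, hmd, hm2, hmlt⟩ := Nat.exists_dvd_of_not_prime2 (by omega) hp
    -- pick a divisor d with 3 ≤ d < N
    obtain ⟨d, hd3, hdlt, hdd⟩ : ∃ d, 3 ≤ d ∧ d < N ∧ d ∣ N := by
      by_cases h3 : 3 ≤ m
      · exact ⟨m, h3, hmlt, hmd⟩
      · have hm : m = 2 := by omega
        subst hm
        have heven : 2 ∣ N := hmd
        refine ⟨N / 2, ?_, ?_, Nat.div_dvd_of_dvd heven⟩
        · obtain ⟨c, hc⟩ := heven; omega
        · obtain ⟨c, hc⟩ := heven; omega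
    intro hP
    have hdvd : Nat.fib d ∣ Nat.fib N := Nat.fib_dvd d N hdd
    have h2d : 2 ≤ Nat.fib d := by
      calc 2 = Nat.fib 3 := by decide
        _ ≤ Nat.fib d := Nat.fib_mono hd3
    have hlt : Nat.fib d < Nat.fib N := pvFibLt (by omega) hdlt
    rcases (Nat.Prime.eq_one_or_self_of_dvd hP _ hdvd) with h1 | hself
    · omega
    · omega

-- a prime Fibonacci value forces index 4 or a prime index (and index ≥ 3)
theorem pvIdxOfPrimeFib (j : Nat) (h : pvIsPrimeA (pvFib j) = true) :
    (((j : Int) == 4) || pvIsPrimeA (j : Int)) = true := by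
  rw [pvFib_eq] at h
  have hP : (Nat.fib j).Prime := (pvIsPrimeA_natCast _).mp h
  by_cases h4 : j = 4
  · subst h4; rfl
  · have hjp : j.Prime := by
      by_contra hc
      exact pvNotPrimeFib j h4 hc hP
    have : pvIsPrimeA (j : Int) = true := (pvIsPrimeA_natCast j).mpr hjp
    simp [this]

theorem pvIdx3OfPrimeFib (j : Nat) (h : pvIsPrimeA (pvFib j) = true) : 3 ≤ j := by
  rw [pvFib_eq] at h
  have hP : (Nat.fib j).Prime := (pvIsPrimeA_natCast _).mp h
  have h2 : 2 ≤ Nat.fib j := hP.two_le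
  by_contra hc
  interval_cases j <;> simp_all

-- the loop condition collapses to value-primality
theorem pvCond_eq (j : Nat) :
    ((((j : Int) == 4) || pvIsPrimeA (j : Int)) && pvIsPrimeA (pvFib j)) = pvIsPrimeA (pvFib j) := by
  by_cases h : pvIsPrimeA (pvFib j) = true
  · rw [h, pvIdxOfPrimeFib j h]; rfl
  · rw [Bool.not_eq_true] at h; rw [h, Bool.and_false]

-- A's list-building loop produces [fib 0, …, fib m]
theorem pvFibs_eq (m : Nat) (hm : 1 ≤ m) :
    (PySem.List.pyRange 2 ((m : Int) + 1) 1).foldl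
      (fun fibs _ => fibs ++ [PySem.List.pyGetD fibs (-1) 0 + PySem.List.pyGetD fibs (-2) 0])
      [0, 1]
      = (List.range (m + 1)).map pvFib := by
  induction m, hm using Nat.le_induction with
  | base =>
    rw [PySem.List.pyRange_one_eq_nil (by norm_num)]
    simp [List.range_succ]
    constructor <;> rfl
  | succ m hm ih =>
    have hsplit : (((m + 1 : Nat) : Int) + 1) = ((m : Int) + 1) + 1 := by push_cast; ring
    rw [hsplit, PySem.List.pyRange_one_succ_right (by exact_mod_cast by omega), List.foldl_append, ih]
    set L := (List.range (m + 1)).map pvFib with hL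
    have hlen : L.length = m + 1 := by simp [hL]
    have hlast : PySem.List.pyGetD L (-1) 0 = pvFib m := by
      rw [PySem.List.pyGetD_neg_ofNat L 1 0 (by omega) (by omega)]
      simp [hL]
    have hlast2 : PySem.List.pyGetD L (-2) 0 = pvFib (m - 1) := by
      rw [PySem.List.pyGetD_neg_ofNat L 2 0 (by omega) (by omega)]
      simp [hL]
    simp only [List.foldl_cons, List.foldl_nil, hlast, hlast2]
    rw [List.range_succ, List.map_append]
    congr 1
    obtain ⟨k, rfl⟩ : ∃ k, m = k + 1 := ⟨m - 1, by omega⟩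
    simp [pvFib]

-- B's fused loop appends exactly the prime fib values of its window, in index order
theorem pvLoopB_eq (c : Nat) : ∀ (j : Nat) (out : List Int),
    pvFibLoopB c (j : Int) (pvFib j) (pvFib (j + 1)) out
      = out ++ (((List.range c).map (fun t => j + t)).filter
          (fun x => pvIsPrimeA (pvFib x))).map pvFib := by
  induction c with
  | zero => intro j out; simp [pvFibLoopB]
  | succ c ih =>
    intro j out
    have hstep : pvFib j + pvFib (j + 1) = pvFib (j + 2) := by
      show _ = pvFib (j + 1) + pvFib j; ring
    rw [pvFibLoopB, hstep, pvCond_eq j]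
    have hk : (j : Int) + 1 = ((j + 1 : Nat) : Int) := by push_cast; ring
    rw [hk, show j + 2 = (j + 1) + 1 from rfl, ih (j + 1), List.range_succ_eq_map]
    have hmap : List.map (fun t => j + 1 + t) (List.range c)
        = List.map (fun t => j + t) (List.map Nat.succ (List.range c)) := by
      rw [List.map_map]
      apply List.map_congr_left
      intro t _
      simp [Function.comp]
      omega
    rw [hmap]
    by_cases hj : pvIsPrimeA (pvFib j) = true
    · simp [hj, List.append_assoc]
    · rw [Bool.not_eq_true] at hj
      simp [hj]

-- the list of prime fib values in index order is strictly increasing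
theorem pvL_pairwise (m : Nat) :
    (((List.range (m + 1)).filter (fun x => pvIsPrimeA (pvFib x))).map pvFib).Pairwise (· < ·) := by
  rw [List.pairwise_map]
  have hbase : ((List.range (m + 1)).filter (fun x => pvIsPrimeA (pvFib x))).Pairwise (· < ·) :=
    List.Pairwise.sublist List.filter_sublist List.pairwise_lt_range
  refine hbase.imp_of_mem ?_
  intro a b ha hb hab
  have ha3 : 3 ≤ a := pvIdx3OfPrimeFib a (by simpa using (List.mem_filter.mp ha).2)
  rw [pvFib_eq, pvFib_eq]
  exact_mod_cast pvFibLt (by omega) hab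

-- ===== VERDICT (by name: the statement is the Claim_ definition above) =====
theorem fibonacci_primes_spec : Claim_equal_fibonacci_primes := by
  intro n _ hp
  obtain ⟨hp1, hp2⟩ := hp
  unfold Spec_fibonacci_primes fibonacci_primes fibonacci_primes_alt
  have hm : n = ((n.toNat : Nat) : Int) := (Int.toNat_of_nonneg (by omega)).symm
  set m := n.toNat with hmdef
  have hm1 : 1 ≤ m := by omega
  rw [hm, pvFibs_eq m hm1]
  simp only []
  -- A's side: filter commutes with map
  rw [List.filter_map]
  have hfe : (List.range (m + 1)).filter ((fun num => pvIsPrimeA num) ∘ pvFib)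
      = (List.range (m + 1)).filter (fun x => pvIsPrimeA (pvFib x)) := rfl
  rw [hfe]
  set L := (((List.range (m + 1)).filter (fun x => pvIsPrimeA (pvFib x))).map pvFib) with hLdef
  have hpl : L.Pairwise (· < ·) := pvL_pairwise m
  have hnd : L.Nodup := hpl.nodup
  rw [PySem.Set.ofList_eq_self_of_nodup L hnd]
  rw [PySem.List.sorted_eq_self_of_pairwise L (fun x => x) (hpl.imp le_of_lt)]
  -- B's side
  have hnt : (((m : Nat) : Int) + 1).toNat = m + 1 := by omega
  rw [hnt]
  have hb : pvFibLoopB (m + 1) ((0 : Nat) : Int) (pvFib 0) (pvFib 1) []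
      = [] ++ (((List.range (m + 1)).map (fun t => 0 + t)).filter
          (fun x => pvIsPrimeA (pvFib x))).map pvFib := pvLoopB_eq (m + 1) 0 []
  have hcast : pvFibLoopB (m + 1) ((0 : Nat) : Int) (pvFib 0) (pvFib 1) []
      = pvFibLoopB (m + 1) 0 0 1 [] := rfl
  rw [← hcast, hb, hLdef]
  simp
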